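-- pv_equiv track=rewrite | github.com/verba-neo/KDT-data-33 | algo/programmers/이상한문자만들기.py | solution
-- ===== SOURCE A (Python) =====
-- def solution(s):
--     idx = 0
--     new_str = ''
--     for char in s:
--         # 공백문자일 경우 그대로 넣고 짝홀판별 idx 리셋
--         if char == ' ':
--             new_str += char
--             idx = 0
--             continue
--         elif idx % 2:
--             new_str += char.lower()
--         elif idx % 2 == 0:
--             new_str += char.upper()
--         idx += 1
--
--     return new_str
-- ===== SOURCE B (Python) =====
-- def solution(s):
--     return ' '.join(
--         ''.join(c.upper() if i % 2 == 0 else c.lower() for i, c in enumerate(w))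
--         for w in s.split(' ')
--     )
-- ===== Notes on version B (the rewrite author's own statement) =====
-- stated objective: idiomatic
-- what changed: Replaces the single stateful pass with a manually reset parity counter by the idiomatic decomposition: split on single spaces, transform each word via enumerate, rejoin with spaces.
import Mathlib
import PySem

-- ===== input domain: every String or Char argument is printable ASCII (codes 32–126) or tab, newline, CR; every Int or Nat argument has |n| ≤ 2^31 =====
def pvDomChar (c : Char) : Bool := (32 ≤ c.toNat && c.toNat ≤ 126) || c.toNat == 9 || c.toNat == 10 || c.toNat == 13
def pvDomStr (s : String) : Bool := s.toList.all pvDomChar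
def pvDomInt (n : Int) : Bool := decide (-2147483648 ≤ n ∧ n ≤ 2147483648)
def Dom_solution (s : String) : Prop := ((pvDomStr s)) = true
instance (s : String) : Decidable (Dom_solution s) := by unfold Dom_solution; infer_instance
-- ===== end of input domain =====

-- B replaces A's single stateful pass (manual parity counter, reset on space) by the
-- idiomatic split(' ') / per-word enumerate transform / ' '.join decomposition.

-- ===== PORT A =====
-- A's loop: state = (idx, accumulated string); branch order as in the Python.
def pvSolGo : List Char → Int → List Char → List Char
  | [], _, acc => acc
  | c :: rest, idx, acc =>
    if c = ' ' then pvSolGo rest 0 (acc ++ [c])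
    else if PySem.Int.mod idx 2 ≠ 0 then pvSolGo rest (idx + 1) (acc ++ [PySem.Chars.lowerChar c])
    else if PySem.Int.mod idx 2 = 0 then pvSolGo rest (idx + 1) (acc ++ [PySem.Chars.upperChar c])
    else pvSolGo rest (idx + 1) acc

def solution (s : String) : String := String.mk (pvSolGo s.toList 0 [])

-- ===== PORT B =====
-- ''.join(c.upper() if i % 2 == 0 else c.lower() for i, c in enumerate(w))
def pvTransform (w : List Char) : List Char :=
  (PySem.List.enumerate w 0).map
    (fun p => if PySem.Int.mod p.1 2 = 0 then PySem.Chars.upperChar p.2 else PySem.Chars.lowerChar p.2)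

def solution_alt (s : String) : String :=
  String.mk (PySem.Chars.join [' '] ((PySem.Chars.splitOn s.toList [' ']).map pvTransform))

-- ===== PRECONDITION & SPEC =====
def Spec_solution (s : String) (out : String) : Prop := out = solution_alt s
instance (s : String) (out : String) : Decidable (Spec_solution s out) := by unfold Spec_solution; infer_instance

-- ===== CLAIM (what is proved, stated in full; the proofs are below) =====
def Claim_equal_solution : Prop := ∀ (s : String), Dom_solution s → Spec_solution s (solution s)

-- ===== LEMMAS AND PROOFS =====

-- common recursive specification: transform with parity counter n, reset on space
def pvG : List Char → Nat → List Char
  | [], _ => []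
  | c :: rest, n =>
    if c = ' ' then ' ' :: pvG rest 0
    else (if n % 2 = 0 then PySem.Chars.upperChar c else PySem.Chars.lowerChar c) :: pvG rest (n + 1)

-- enumerate-map starting at an arbitrary offset (proof-side generalisation of pvTransform)
def pvTF (w : List Char) (n : Int) : List Char :=
  (PySem.List.enumerate w n).map
    (fun p => if PySem.Int.mod p.1 2 = 0 then PySem.Chars.upperChar p.2 else PySem.Chars.lowerChar p.2)

lemma pvTransform_eq (w : List Char) : pvTransform w = pvTF w 0 := rfl

lemma pvTF_nil (n : Int) : pvTF [] n = [] := rfl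

lemma pvTF_cons (c : Char) (w : List Char) (n : Int) :
    pvTF (c :: w) n =
      (if PySem.Int.mod n 2 = 0 then PySem.Chars.upperChar c else PySem.Chars.lowerChar c)
        :: pvTF w (n + 1) := by
  simp [pvTF, PySem.List.enumerate_cons]

-- A's loop equals the spec pvG
lemma pvSolGo_eq_pvG (cs : List Char) : ∀ (n : Nat) (acc : List Char),
    pvSolGo cs (n : Int) acc = acc ++ pvG cs n := by
  induction cs with
  | nil => intro n acc; simp [pvSolGo, pvG]
  | cons c rest ih =>
    intro n acc
    by_cases hc : c = ' '
    · subst hc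
      simp only [pvSolGo, pvG]
      rw [if_pos trivial, if_pos trivial]
      simpa using ih 0 (acc ++ [' '])
    · have hm : PySem.Int.mod (n : Int) 2 = ((n % 2 : Nat) : Int) := by
        exact_mod_cast PySem.Int.mod_natCast n 2
      have hs : ((n : Int) + 1) = (((n + 1 : Nat)) : Int) := by push_cast; ring
      simp only [pvSolGo, pvG, if_neg hc]
      by_cases hp : n % 2 = 0
      · have h2 : PySem.Int.mod (n : Int) 2 = 0 := by rw [hm]; exact_mod_cast hp
        rw [if_neg (not_not_intro h2), if_pos h2, if_pos hp, hs]
        simpa using ih (n + 1) (acc ++ [PySem.Chars.upperChar c])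
      · have h2 : PySem.Int.mod (n : Int) 2 ≠ 0 := by
          rw [hm]; exact_mod_cast hp
        rw [if_pos h2, if_neg hp, hs]
        simpa using ih (n + 1) (acc ++ [PySem.Chars.lowerChar c])

-- structural equations for PySem.Chars.splitOn on a single-character separator
lemma pvGo_acc (sep : List Char) : ∀ (fuel : Nat) (l cur : List Char) (acc : List (List Char)),
    PySem.Chars.splitOn.go sep fuel l cur acc =
      acc.reverse ++ PySem.Chars.splitOn.go sep fuel l cur [] := by
  intro fuel
  induction fuel with
  | zero => intro l cur acc; simp [PySem.Chars.splitOn.go]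
  | succ f ih =>
    intro l cur acc
    cases l with
    | nil => simp [PySem.Chars.splitOn.go]
    | cons c rest =>
      by_cases hp : sep.isPrefixOf (c :: rest) = true
      · simp only [PySem.Chars.splitOn.go, hp, if_pos]
        rw [ih _ _ (cur.reverse :: acc), ih _ _ (cur.reverse :: [])]
        simp
      · simp only [PySem.Chars.splitOn.go, hp, Bool.false_eq_true, if_false]
        exact ih rest (c :: cur) acc

lemma pvGo_cur (sep : List Char) : ∀ (fuel : Nat) (l cur : List Char),
    PySem.Chars.splitOn.go sep fuel l cur [] =
      (PySem.Chars.splitOn.go sep fuel l [] []).modifyHead (cur.reverse ++ ·) := by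
  intro fuel
  induction fuel with
  | zero => intro l cur; simp [PySem.Chars.splitOn.go]
  | succ f ih =>
    intro l cur
    cases l with
    | nil => simp [PySem.Chars.splitOn.go]
    | cons c rest =>
      by_cases hp : sep.isPrefixOf (c :: rest) = true
      · simp only [PySem.Chars.splitOn.go, hp, if_pos]
        rw [pvGo_acc sep f _ [] (cur.reverse :: []), pvGo_acc sep f _ [] ([].reverse :: [])]
        simp
      · simp only [PySem.Chars.splitOn.go, hp, Bool.false_eq_true, if_false]
        rw [ih rest (c :: cur), ih rest [c]]
        cases h : PySem.Chars.splitOn.go sep f rest [] [] with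
        | nil => simp
        | cons w ws => simp

lemma pvSplit_nil : PySem.Chars.splitOn [] [' '] = [[]] := rfl

lemma pvSplit_space (r : List Char) :
    PySem.Chars.splitOn (' ' :: r) [' '] = [] :: PySem.Chars.splitOn r [' '] := by
  show PySem.Chars.splitOn.go [' '] (r.length + 1 + 1) (' ' :: r) [] [] = _
  have hp : ([' '] : List Char).isPrefixOf (' ' :: r) = true := by
    simp [List.isPrefixOf]
  simp only [PySem.Chars.splitOn.go, hp, if_pos]
  rw [pvGo_acc [' '] (r.length + 1) _ [] ([].reverse :: [])]
  simp [PySem.Chars.splitOn]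

lemma pvSplit_char (c : Char) (r : List Char) (hc : c ≠ ' ') :
    PySem.Chars.splitOn (c :: r) [' '] =
      (PySem.Chars.splitOn r [' ']).modifyHead (c :: ·) := by
  show PySem.Chars.splitOn.go [' '] (r.length + 1 + 1) (c :: r) [] [] = _
  have hp : ([' '] : List Char).isPrefixOf (c :: r) = false := by
    simp [List.isPrefixOf]; exact Ne.symm hc
  simp only [PySem.Chars.splitOn.go, hp, Bool.false_eq_true, if_false]
  rw [pvGo_cur [' '] (r.length + 1) r [c]]
  simp [PySem.Chars.splitOn]

lemma pvSplit_ne_nil (cs : List Char) : PySem.Chars.splitOn cs [' '] ≠ [] := by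
  induction cs with
  | nil => simp [pvSplit_nil]
  | cons c rest ih =>
    by_cases hc : c = ' '
    · subst hc; simp [pvSplit_space]
    · rw [pvSplit_char c rest hc]
      cases h : PySem.Chars.splitOn rest [' '] with
      | nil => exact absurd h ih
      | cons w ws => simp

-- join lemmas for the two head shapes the induction meets
lemma pvJoin_cons_head (x : Char) (xs : List Char) (t : List (List Char)) :
    PySem.Chars.join [' '] ((x :: xs) :: t) = x :: PySem.Chars.join [' '] (xs :: t) := by
  cases t <;> simp [PySem.Chars.join, List.intercalate]

lemma pvJoin_nil_cons (a : List Char) (t : List (List Char)) :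
    PySem.Chars.join [' '] ([] :: a :: t) = ' ' :: PySem.Chars.join [' '] (a :: t) := by
  simp [PySem.Chars.join, List.intercalate]

lemma pvKey (cs : List Char) : ∀ (n : Nat) (w : List Char) (ws : List (List Char)),
    PySem.Chars.splitOn cs [' '] = w :: ws →
    PySem.Chars.join [' '] (pvTF w (n : Int) :: ws.map pvTransform) = pvG cs n := by
  induction cs with
  | nil =>
    intro n w ws h
    rw [pvSplit_nil] at h
    injection h with h1 h2
    subst h1; subst h2
    simp [pvTF_nil, PySem.Chars.join, List.intercalate, pvG]
  | cons c rest ih =>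
    intro n w ws h
    by_cases hc : c = ' '
    · subst hc
      rw [pvSplit_space] at h
      cases hrest : PySem.Chars.splitOn rest [' '] with
      | nil => exact absurd hrest (pvSplit_ne_nil rest)
      | cons w' ws' =>
        rw [hrest] at h
        injection h with h1 h2
        subst h1; subst h2
        have hIH := ih 0 w' ws' hrest
        rw [Nat.cast_zero] at hIH
        simp only [pvTF_nil, List.map_cons, pvTransform_eq w']
        rw [pvJoin_nil_cons, hIH]
        simp [pvG]
    · rw [pvSplit_char c rest hc] at h
      cases hrest : PySem.Chars.splitOn rest [' '] with
      | nil => exact absurd hrest (pvSplit_ne_nil rest)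
      | cons w' ws' =>
        rw [hrest] at h
        injection h with h1 h2
        subst h1; subst h2
        have hIH := ih (n + 1) w' ws' hrest
        have hm : PySem.Int.mod (n : Int) 2 = ((n % 2 : Nat) : Int) := by
          exact_mod_cast PySem.Int.mod_natCast n 2
        have hs : ((n : Int) + 1) = (((n + 1 : Nat)) : Int) := by push_cast; ring
        rw [pvTF_cons, pvJoin_cons_head, hs, hIH]
        by_cases hp : n % 2 = 0
        · have h2 : PySem.Int.mod (n : Int) 2 = 0 := by rw [hm]; exact_mod_cast hp
          rw [if_pos h2]; simp only [pvG, if_neg hc, if_pos hp]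
        · have h2 : ¬ PySem.Int.mod (n : Int) 2 = 0 := by
            rw [hm]; exact_mod_cast hp
          rw [if_neg h2]; simp only [pvG, if_neg hc, if_neg hp]

-- ===== VERDICT (by name: the statement is the Claim_ definition above) =====
theorem solution_spec : Claim_equal_solution := by
  intro s _
  show solution s = solution_alt s
  unfold solution solution_alt
  cases hsp : PySem.Chars.splitOn s.toList [' '] with
  | nil => exact absurd hsp (pvSplit_ne_nil s.toList)
  | cons w ws =>
    have h1 : pvSolGo s.toList ((0 : Nat) : Int) [] = pvG s.toList 0 := by
      simpa using pvSolGo_eq_pvG s.toList 0 []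
    rw [Nat.cast_zero] at h1
    have h2 := pvKey s.toList 0 w ws hsp
    rw [Nat.cast_zero] at h2
    simp only [List.map_cons, pvTransform_eq w]
    rw [h2, h1]
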